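-- pv_equiv track=rewrite | github.com/albertE-111/star_wars-tool | batch_market_brief.py | filter_queries
-- ===== SOURCE A (Python) =====
-- def filter_queries(items: list[dict[str, str]], category: str, subcategory: str) -> list[dict[str, str]]:
--     filtered = items
--
--     if category.strip():
--         category_needle = category.strip().casefold()
--         filtered = [item for item in filtered if item["category"].casefold() == category_needle]
--
--     if subcategory.strip():
--         subcategory_needle = subcategory.strip().casefold()
--         filtered = [item for item in filtered if item["subcategory"].casefold() == subcategory_needle]
--
--     return filtered
-- ===== SOURCE B (Python) =====
-- def filter_queries(items: list[dict[str, str]], category: str, subcategory: str) -> list[dict[str, str]]: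
--     cat = category.strip().casefold()
--     sub = subcategory.strip().casefold()
--     return [
--         item
--         for item in items
--         if (not cat or item["category"].casefold() == cat)
--         and (not sub or item["subcategory"].casefold() == sub)
--     ]
-- ===== Notes on version B (the rewrite author's own statement) =====
-- stated objective: simpler
-- what changed: Both needles are computed up front and the two sequential filtering scans (which build an intermediate list) are fused into a single pass with one compound short-circuit predicate.
import Mathlib
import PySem

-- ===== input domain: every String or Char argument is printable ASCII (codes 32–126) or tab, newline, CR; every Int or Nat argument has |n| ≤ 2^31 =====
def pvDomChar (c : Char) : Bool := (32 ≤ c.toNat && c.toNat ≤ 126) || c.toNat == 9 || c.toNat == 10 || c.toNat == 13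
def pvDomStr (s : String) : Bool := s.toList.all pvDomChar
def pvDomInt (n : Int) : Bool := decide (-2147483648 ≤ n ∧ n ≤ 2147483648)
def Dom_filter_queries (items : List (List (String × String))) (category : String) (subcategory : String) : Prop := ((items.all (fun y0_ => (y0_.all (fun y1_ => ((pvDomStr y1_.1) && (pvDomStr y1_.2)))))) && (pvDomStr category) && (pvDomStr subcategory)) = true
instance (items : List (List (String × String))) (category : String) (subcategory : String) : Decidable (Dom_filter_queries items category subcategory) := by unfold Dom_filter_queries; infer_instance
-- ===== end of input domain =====

-- B fuses A's two sequential filtering scans into one pass with a compound short-circuit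
-- predicate (objective: simpler). Equivalence is about return values; on the ASCII domain
-- casefold = lower. item["k"] (KeyError = none) is first-match lookup in the assoc list.
def pyGetKey (item : List (String × String)) (k : String) : Option String :=
  (item.find? (fun p => p.1 == k)).map (fun p => p.2)

-- ===== PORT A =====
def filter_queries (items : List (List (String × String))) (category : String) (subcategory : String) : List (List (String × String)) :=
  let filtered := items
  let filtered :=
    if PySem.Str.strip category ≠ "" then
      let category_needle := PySem.Str.lower (PySem.Str.strip category)
      -- 'none' (KeyError) is excluded by Pre_; the getD "" default is never reached there
      filtered.filter (fun item => PySem.Str.lower ((pyGetKey item "category").getD "") == category_needle)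
    else filtered
  let filtered :=
    if PySem.Str.strip subcategory ≠ "" then
      let subcategory_needle := PySem.Str.lower (PySem.Str.strip subcategory)
      filtered.filter (fun item => PySem.Str.lower ((pyGetKey item "subcategory").getD "") == subcategory_needle)
    else filtered
  filtered

-- ===== PORT B =====
def filter_queries_alt (items : List (List (String × String))) (category : String) (subcategory : String) : List (List (String × String)) :=
  let cat := PySem.Str.lower (PySem.Str.strip category)
  let sub := PySem.Str.lower (PySem.Str.strip subcategory)
  items.filter (fun item =>
    (cat == "" || PySem.Str.lower ((pyGetKey item "category").getD "") == cat)
    && (sub == "" || PySem.Str.lower ((pyGetKey item "subcategory").getD "") == sub))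

-- ===== PRECONDITION & SPEC =====
-- Pre_ excludes exactly the inputs on which Python A raises KeyError: when the category
-- filter is active every item needs a "category" key, and when the subcategory filter is
-- active every item that survives the category filter (or all items, if that filter is
-- inactive) needs a "subcategory" key. B raises on exactly the same inputs.
def Pre_filter_queries (items : List (List (String × String))) (category : String) (subcategory : String) : Prop :=
  (PySem.Str.strip category ≠ "" → ∀ item ∈ items, (pyGetKey item "category").isSome) ∧
  (PySem.Str.strip subcategory ≠ "" → ∀ item ∈ items,
      (PySem.Str.strip category = "" ∨
        PySem.Str.lower ((pyGetKey item "category").getD "") = PySem.Str.lower (PySem.Str.strip category)) →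
      (pyGetKey item "subcategory").isSome)
instance (items : List (List (String × String))) (category : String) (subcategory : String) : Decidable (Pre_filter_queries items category subcategory) := by unfold Pre_filter_queries; infer_instance

def pvWitness_filter_queries : (List (List (String × String))) × String × String :=
  ([[("category", "Food"), ("subcategory", "Fruit")], [("category", "Toys"), ("subcategory", "Cars")]], " food ", "")

def Spec_filter_queries (items : List (List (String × String))) (category : String) (subcategory : String) (out : List (List (String × String))) : Prop := out = filter_queries_alt items category subcategory
instance (items : List (List (String × String))) (category : String) (subcategory : String) (out : List (List (String × String))) : Decidable (Spec_filter_queries items category subcategory out) := by unfold Spec_filter_queries; infer_instance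

-- ===== CLAIM (what is proved, stated in full; the proofs are below) =====
def Claim_equal_filter_queries : Prop := ∀ (items : List (List (String × String))) (category : String) (subcategory : String), Dom_filter_queries items category subcategory → Pre_filter_queries items category subcategory → Spec_filter_queries items category subcategory (filter_queries items category subcategory)

-- ===== LEMMAS AND PROOFS =====
theorem lower_eq_empty_iff (s : String) : PySem.Str.lower s = "" ↔ s = "" := by
  constructor
  · intro h
    have h2 := congrArg String.toList h
    rw [PySem.Str.toList_lower] at h2
    have hnil : s.toList = [] := by
      cases hsl : s.toList with
      | nil => rfl
      | cons a l => rw [hsl] at h2; simp [PySem.Chars.lower] at h2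
    exact String.toList_inj.mp (by simp [hnil])
  · rintro rfl; rfl

theorem lower_beq_empty (s : String) : (PySem.Str.lower s == "") = (s == "") := by
  by_cases h : s = "" <;> simp [h, lower_eq_empty_iff]

-- ===== VERDICT (by name: the statement is the Claim_ definition above) =====
theorem filter_queries_spec : Claim_equal_filter_queries := by
  intro items category subcategory _ _
  unfold Spec_filter_queries filter_queries filter_queries_alt
  have bf : ∀ s : String, s ≠ "" → (s == "") = false := fun s h => beq_eq_false_iff_ne.mpr h
  by_cases hc : PySem.Str.strip category = ""
  · by_cases hs : PySem.Str.strip subcategory = ""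
    · simp [hc, hs, lower_beq_empty]
    · simp [hc, hs, bf _ hs, lower_beq_empty]
  · by_cases hs : PySem.Str.strip subcategory = ""
    · simp [hc, hs, bf _ hc, lower_beq_empty]
    · simp [hc, hs, bf _ hc, bf _ hs, lower_beq_empty, List.filter_filter, Bool.and_comm]
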